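-- pv_equiv track=rewrite | github.com/oxhead/CodingYourWay | src/lt_541.py | reverseStr_verbose
-- ===== SOURCE A (Python) =====
-- def reverseStr_verbose(s, k):
--     """
--     :type s: str
--     :type k: int
--     :rtype: str
--     """
--     # Time: O(n)
--     # Space: O(1)
--     def reverse(data, i, j):
--         while i < j:
--             data[i], data[j] = data[j], data[i]
--             i += 1
--             j -= 1
--     data = list(s)
--     start, end = 0, -1
--     rounds = 0
--     while start < len(s) - 1:
--         start = rounds * k
--         end = start + k - 1
--         if end >= len(s):
--             end = len(s) - 1
--         reverse(data, start, end)
--         rounds += 2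
--     return "".join(data)
-- ===== SOURCE B (Python) =====
-- def reverseStr_verbose(s, k):
--     chunks = []
--     for i in range(0, len(s), 2 * k):
--         chunks.append(s[i:i + k][::-1] + s[i + k:i + 2 * k])
--     return "".join(chunks)
-- ===== Notes on version B (the rewrite author's own statement) =====
-- stated objective: idiomatic
-- what changed: Replaces the mutable char-list with an in-place two-pointer reversal helper and a rounds-counting while-loop by a single pass over the string in immutable 2k-sized chunks (range(0, len(s), 2*k)) built from reversed slices and joined at the end.
-- outside the precondition, e.g. on reverseStr_verbose('a', -1): A returns 'a', B returns ''; on reverseStr_verbose('a', 0): A returns 'a', B raises ValueError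
import Mathlib
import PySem

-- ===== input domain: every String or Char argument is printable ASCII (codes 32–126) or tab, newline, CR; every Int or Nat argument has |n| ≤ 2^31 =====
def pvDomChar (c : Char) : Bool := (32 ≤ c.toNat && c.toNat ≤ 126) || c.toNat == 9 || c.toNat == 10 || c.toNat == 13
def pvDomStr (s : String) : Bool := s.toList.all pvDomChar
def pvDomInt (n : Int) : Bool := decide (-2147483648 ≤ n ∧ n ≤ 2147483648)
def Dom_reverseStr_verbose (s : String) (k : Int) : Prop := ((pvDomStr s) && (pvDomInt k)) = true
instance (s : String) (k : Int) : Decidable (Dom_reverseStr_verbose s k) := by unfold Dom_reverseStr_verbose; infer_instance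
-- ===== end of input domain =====

-- B replaces A's mutable char-list, in-place two-pointer reversal and rounds-counting while-loop
-- by a single pass over immutable 2k-chunks built from reversed slices (objective: idiomatic).
-- A does not terminate for k ≤ 0 on strings of length ≥ 2; Pre_ restricts to the natural domain k ≥ 1.

-- ===== PORT A =====
-- data[i], data[j] = data[j], data[i]: wherever the swap is reached and A returns (k ≥ 1),
-- 0 ≤ i < j < len(data), so Nat indexing via .toNat with a getD fallback is exact there.
def pvSwap (d : List Char) (i j : Nat) : List Char :=
  (d.set i (d.getD j ' ')).set j (d.getD i ' ')

-- the inner 'reverse(data, i, j)' while-loop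
def pvReverse (d : List Char) (i j : Int) : List Char :=
  if i < j then pvReverse (pvSwap d i.toNat j.toNat) (i + 1) (j - 1) else d
termination_by (j - i).toNat
decreasing_by omega

-- the outer while-loop; fuel bounds the iteration count, which is at most len(s)+2 wherever
-- the Python loop terminates (k ≥ 1); for k ≤ 0 and len ≥ 2 Python A diverges (outside Pre_).
def pvLoop (d : List Char) (n rounds start kk : Int) : Nat → List Char
  | 0 => d
  | fuel + 1 =>
    if start < n - 1 then
      let start' := rounds * kk
      let e0 := start' + kk - 1
      let e := if e0 ≥ n then n - 1 else e0
      pvLoop (pvReverse d start' e) n (rounds + 2) start' kk fuel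
    else d

def reverseStr_verbose (s : String) (k : Int) : String :=
  let d := s.toList
  String.ofList (pvLoop d (d.length : Int) 0 0 k (d.length + 2))

-- ===== PORT B =====
def reverseStr_verbose_alt (s : String) (k : Int) : String :=
  let cs := s.toList
  let n : Int := cs.length
  let chunks := (PySem.List.pyRange 0 n (2 * k)).foldl
    (fun acc i => acc ++ [(PySem.List.slice cs (some i) (some (i + k))).reverse
                          ++ PySem.List.slice cs (some (i + k)) (some (i + 2 * k))]) []
  String.ofList (PySem.Chars.join [] chunks)

-- ===== PRECONDITION & SPEC =====
-- Pre_ excludes k ≤ 0 except for the empty string with k < 0 (where both return ""):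
-- for k ≤ 0 A diverges when len(s) ≥ 2, and on shorter inputs accidentally returns s while
-- B's range-based chunking raises ValueError (k = 0) or returns "" (k < 0, len(s) = 1).
def Pre_reverseStr_verbose (s : String) (k : Int) : Prop := 1 ≤ k ∨ (s = "" ∧ k ≤ -1)
instance (s : String) (k : Int) : Decidable (Pre_reverseStr_verbose s k) := by
  unfold Pre_reverseStr_verbose; infer_instance

def pvWitness_reverseStr_verbose : String × Int := ("abcdefg", 2)

def Spec_reverseStr_verbose (s : String) (k : Int) (out : String) : Prop := out = reverseStr_verbose_alt s k
instance (s : String) (k : Int) (out : String) : Decidable (Spec_reverseStr_verbose s k out) := by unfold Spec_reverseStr_verbose; infer_instance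

-- ===== CLAIM (what is proved, stated in full; the proofs are below) =====
def Claim_equal_reverseStr_verbose : Prop := ∀ (s : String) (k : Int), Dom_reverseStr_verbose s k → Pre_reverseStr_verbose s k → Spec_reverseStr_verbose s k (reverseStr_verbose s k)

-- ===== LEMMAS AND PROOFS =====

def gSpec (kN : Nat) : List Char → List Char
  | [] => []
  | c :: cs =>
      ((c :: cs).take (kN + 1)).reverse ++ ((c :: cs).drop (kN + 1)).take (kN + 1)
        ++ gSpec kN ((c :: cs).drop (2 * (kN + 1)))
termination_by l => l.length
decreasing_by simp; omega

lemma gSpec_cons (kN : Nat) (l : List Char) (hl : l ≠ []) :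
    gSpec kN l = (l.take (kN + 1)).reverse ++ (l.drop (kN + 1)).take (kN + 1)
        ++ gSpec kN (l.drop (2 * (kN + 1))) := by
  cases l with
  | nil => simp at hl
  | cons c cs => rw [gSpec]

lemma pyRange_cons_of_pos (a b s : Int) (hs : 0 < s) (hab : a < b) :
    PySem.List.pyRange a b s = a :: PySem.List.pyRange (a + s) b s := by
  rw [PySem.List.pyRange_of_pos _ _ hs, PySem.List.pyRange_of_pos _ _ hs]
  rw [if_pos hab]
  by_cases h2 : a + s < b
  · rw [if_pos h2]
    have hnum : b - a + s - 1 = (b - (a + s) + s - 1) + 1 * s := by ring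
    have hdiv : (b - a + s - 1) / s = (b - (a + s) + s - 1) / s + 1 := by
      rw [hnum, Int.add_mul_ediv_right _ _ (by omega : s ≠ 0)]
    rw [hdiv]
    have hge : 0 ≤ (b - (a + s) + s - 1) / s := by
      apply Int.ediv_nonneg <;> omega
    have ht : ((b - (a + s) + s - 1) / s + 1).toNat = ((b - (a + s) + s - 1) / s).toNat + 1 := by omega
    rw [ht, List.range_succ_eq_map, List.map_cons, List.map_map]
    congr 1
    · ring
    apply List.map_congr_left
    intro x _
    simp only [Function.comp_apply]
    push_cast
    ring
  · rw [if_neg h2]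
    have hnum : b - a + s - 1 = (b - a - 1) + 1 * s := by ring
    have hz : (b - a - 1) / s = 0 := Int.ediv_eq_zero_of_lt (by omega) (by omega)
    have hdiv : (b - a + s - 1) / s = 1 := by
      rw [hnum, Int.add_mul_ediv_right _ _ (by omega : s ≠ 0), hz]; omega
    rw [hdiv]
    simp

lemma pyRange_nil_of_pos (a b s : Int) (hs : 0 < s) (hab : ¬ a < b) :
    PySem.List.pyRange a b s = [] := by
  rw [PySem.List.pyRange_of_pos _ _ hs, if_neg hab]; simp

lemma flatMap_chunks_eq_g (kN : Nat) (cs : List Char) : ∀ (i : Nat),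
    (PySem.List.pyRange (i : Int) (cs.length : Int) (2 * ((kN : Int) + 1))).flatMap
      (fun j => (PySem.List.slice cs (some j) (some (j + ((kN : Int) + 1)))).reverse
                 ++ PySem.List.slice cs (some (j + ((kN : Int) + 1))) (some (j + 2 * ((kN : Int) + 1))))
      = gSpec kN (cs.drop i) := by
  intro i
  induction hm : cs.length - i using Nat.strong_induction_on generalizing i with
  | _ m ih =>
  by_cases hi : i < cs.length
  · rw [pyRange_cons_of_pos _ _ _ (by positivity) (by exact_mod_cast hi)]
    rw [List.flatMap_cons]
    have hcast : (i : Int) + 2 * ((kN : Int) + 1) = ((i + 2 * (kN + 1) : Nat) : Int) := by push_cast; ring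
    rw [hcast, ih (cs.length - (i + 2 * (kN + 1))) (by omega) _ rfl]
    have h1 : PySem.List.slice cs (some (i : Int)) (some ((i : Int) + ((kN : Int) + 1)))
        = (cs.drop i).take (kN + 1) := by
      rw [PySem.List.slice_toNat cs (by positivity) (by positivity)]
      congr 1
      omega
    have h2 : PySem.List.slice cs (some ((i : Int) + ((kN : Int) + 1))) (some ((i + 2 * (kN + 1) : Nat) : Int))
        = (cs.drop (i + (kN + 1))).take (kN + 1) := by
      rw [PySem.List.slice_toNat cs (by positivity) (by push_cast; positivity)]
      congr 1
      omega
    simp only [h1, h2]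
    rw [gSpec_cons kN (List.drop i cs) (by
      intro h
      have := List.drop_eq_nil_iff.mp h
      omega)]
    simp only [List.drop_drop]
  · rw [pyRange_nil_of_pos _ _ _ (by positivity) (by exact_mod_cast hi)]
    rw [List.drop_eq_nil_of_le (by omega), gSpec]
    simp

lemma joinNil (l : List (List Char)) : PySem.Chars.join [] l = l.flatten := by
  induction l with
  | nil => simp [PySem.Chars.join_nil]
  | cons a t ih =>
    cases t with
    | nil => simp [PySem.Chars.join_singleton]
    | cons b r => rw [PySem.Chars.join_cons_cons, List.flatten_cons, ih]; simp

lemma alt_eq_g (s : String) (kN : Nat) :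
    reverseStr_verbose_alt s ((kN : Int) + 1) = String.ofList (gSpec kN s.toList) := by
  unfold reverseStr_verbose_alt
  simp only [PySem.List.foldl_append_singleton_eq_map, List.nil_append, joinNil]
  rw [← List.flatMap_def]
  have h0 : (0 : Int) = ((0 : Nat) : Int) := by norm_num
  rw [h0]
  have h2 : 2 * ((kN : Int) + 1) = 2 * ((kN : Int) + 1) := rfl
  have := flatMap_chunks_eq_g kN s.toList 0
  simp only [Nat.cast_zero] at this ⊢
  rw [this]
  simp

lemma pvReverse_nop (d : List Char) (i j : Int) (h : ¬ i < j) : pvReverse d i j = d := by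
  rw [pvReverse]; simp [h]

lemma getD_mid (pre suf : List Char) (b : Char) : (pre ++ b :: suf).getD pre.length ' ' = b := by
  induction pre with
  | nil => rfl
  | cons m t _ => simp

lemma set_mid (pre suf : List Char) (b x : Char) : (pre ++ b :: suf).set pre.length x = pre ++ x :: suf := by
  induction pre with
  | nil => rfl
  | cons m t ih => simp [List.set_cons_succ, ih]

lemma swap_append (pre ms suf : List Char) (a b : Char) :
    pvSwap (pre ++ a :: (ms ++ b :: suf)) pre.length (pre.length + ms.length + 1)
      = pre ++ b :: (ms ++ a :: suf) := by
  have hre : pre ++ a :: (ms ++ b :: suf) = (pre ++ a :: ms) ++ b :: suf := by simp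
  have hlen : pre.length + ms.length + 1 = (pre ++ a :: ms).length := by simp; omega
  unfold pvSwap
  have gj : (pre ++ a :: (ms ++ b :: suf)).getD (pre.length + ms.length + 1) ' ' = b := by
    rw [hre, hlen, getD_mid]
  have gi : (pre ++ a :: (ms ++ b :: suf)).getD pre.length ' ' = a := getD_mid _ _ _
  rw [gj, gi, set_mid]
  have hre2 : pre ++ b :: (ms ++ b :: suf) = (pre ++ b :: ms) ++ b :: suf := by simp
  have hlen2 : pre.length + ms.length + 1 = (pre ++ b :: ms).length := by simp; omega
  rw [hre2, hlen2, set_mid]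
  simp

lemma pvReverse_eq (mid : List Char) : ∀ (pre suf : List Char),
    pvReverse (pre ++ mid ++ suf) (pre.length : Int) ((pre.length : Int) + mid.length - 1)
      = pre ++ mid.reverse ++ suf := by
  induction hm : mid.length using Nat.strong_induction_on generalizing mid with
  | _ m ih =>
  intro pre suf
  match mid, hm with
  | [], hm =>
    subst hm
    simp only [List.length_nil, Nat.cast_zero, add_zero, List.reverse_nil]
    rw [pvReverse_nop _ _ _ (by omega)]
  | [a], hm =>
    subst hm
    simp only [List.length_cons, List.length_nil, List.reverse_cons, List.reverse_nil,
      List.nil_append]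
    rw [pvReverse_nop _ _ _ (by omega)]
  | a :: c :: rest, hm =>
    subst hm
    obtain ⟨ms, b, hsplit⟩ : ∃ ms b, c :: rest = ms ++ [b] :=
      ⟨(c :: rest).dropLast, (c :: rest).getLast (List.cons_ne_nil _ _), (List.dropLast_append_getLast (List.cons_ne_nil _ _)).symm⟩
    rw [hsplit]
    rw [pvReverse]
    have hlm : (a :: (ms ++ [b])).length = ms.length + 2 := by simp
    rw [if_pos (by push_cast [hlm]; omega)]
    have hsw : pvSwap (pre ++ (a :: (ms ++ [b])) ++ suf) (pre.length : Int).toNat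
        (((pre.length : Int) + (a :: (ms ++ [b])).length - 1)).toNat
        = pre ++ (b :: (ms ++ [a])) ++ suf := by
      have h1 : pre ++ (a :: (ms ++ [b])) ++ suf = pre ++ a :: (ms ++ b :: suf) := by simp
      have h2 : pre ++ (b :: (ms ++ [a])) ++ suf = pre ++ b :: (ms ++ a :: suf) := by simp
      rw [h1, h2]
      have e1 : ((pre.length : Int)).toNat = pre.length := by omega
      have e2 : (((pre.length : Int) + (a :: (ms ++ [b])).length - 1)).toNat
          = pre.length + ms.length + 1 := by push_cast [hlm]; omega
      rw [e1, e2, swap_append]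
    rw [hsw]
    have hregroup : pre ++ (b :: (ms ++ [a])) ++ suf = (pre ++ [b]) ++ ms ++ (a :: suf) := by simp
    rw [hregroup]
    have harg1 : (pre.length : Int) + 1 = ((pre ++ [b]).length : Int) := by simp
    have harg2 : (pre.length : Int) + (a :: (ms ++ [b])).length - 1 - 1
        = ((pre ++ [b]).length : Int) + ms.length - 1 := by push_cast [hlm]; simp; omega
    rw [harg1, harg2, ih ms.length (by rw [hsplit]; simp) ms rfl]
    simp

lemma pvLoop_past (kk : Int) (hk : 1 ≤ kk) (d : List Char) (rounds prev : Int)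
    (h : (d.length : Int) ≤ rounds * kk) (hr : 0 ≤ rounds) :
    ∀ fuel, pvLoop d (d.length : Int) rounds prev kk fuel = d := by
  intro fuel
  induction fuel generalizing rounds prev with
  | zero => rfl
  | succ f ihf =>
    rw [pvLoop]
    by_cases hc : prev < (d.length : Int) - 1
    · rw [if_pos hc]
      have hnop : pvReverse d (rounds * kk)
          (if rounds * kk + kk - 1 ≥ (d.length : Int) then (d.length : Int) - 1
           else rounds * kk + kk - 1) = d := by
        apply pvReverse_nop
        split_ifs with hif <;> omega
      simp only [hnop]
      exact ihf (rounds + 2) (rounds * kk) (by nlinarith) (by omega)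
    · rw [if_neg hc]

lemma pvLoop_inv (kN : Nat) : ∀ (fuel : Nat) (rest pre : List Char) (r : Nat) (prev : Int),
    (pre.length : Int) = 2 * r * ((kN : Int) + 1) →
    rest.length + 1 ≤ fuel →
    (rest ≠ [] → prev < ((pre.length : Int) + rest.length) - 1) →
    pvLoop (pre ++ rest) ((pre.length : Int) + rest.length) (2 * r) prev ((kN : Int) + 1) fuel
      = pre ++ gSpec kN rest := by
  intro fuel
  induction fuel with
  | zero => intro rest pre r prev _ hf _; omega
  | succ f ihf =>
    intro rest pre r prev hpre hf hprev
    cases hrest : rest with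
    | nil =>
      subst hrest
      simp only [List.append_nil, List.length_nil, Nat.cast_zero, add_zero, gSpec]
      exact pvLoop_past _ (by omega) pre (2 * r) prev (by rw [hpre]) (by omega) (f + 1)
    | cons c cs =>
      rw [← hrest]
      have hne : rest ≠ [] := by rw [hrest]; exact List.cons_ne_nil _ _
      have hlen1 : 1 ≤ rest.length := by rw [hrest]; simp
      rw [pvLoop, if_pos (hprev hne)]
      set kk : Int := (kN : Int) + 1 with hkk
      set mid := rest.take (kN + 1) with hmid
      set suf := rest.drop (kN + 1) with hsuf
      have hmidlen : mid.length = min (kN + 1) rest.length := by simp [hmid]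
      have hsuflen : suf.length = rest.length - (kN + 1) := by simp [hsuf]
      have hstart : 2 * (r : Int) * kk = (pre.length : Int) := hpre.symm
      have he : (if 2 * (r : Int) * kk + kk - 1 ≥ ((pre.length : Int) + rest.length) then
            ((pre.length : Int) + rest.length) - 1 else 2 * (r : Int) * kk + kk - 1)
          = (pre.length : Int) + mid.length - 1 := by
        rw [hstart, hmidlen]
        split_ifs with hif <;> push_cast <;> omega
      have hsplit2 : pre ++ rest = pre ++ mid ++ suf := by
        rw [hmid, hsuf, List.append_assoc, List.take_append_drop]
      have hrev : pvReverse (pre ++ rest) (2 * (r : Int) * kk)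
          (if 2 * (r : Int) * kk + kk - 1 ≥ ((pre.length : Int) + rest.length) then
            ((pre.length : Int) + rest.length) - 1 else 2 * (r : Int) * kk + kk - 1)
          = pre ++ mid.reverse ++ suf := by
        rw [he, hstart, hsplit2, pvReverse_eq mid pre suf]
      -- unfold the loop body's lets
      show pvLoop (pvReverse (pre ++ rest) (2 * (r : Int) * kk) _) _ _ _ _ f = _
      rw [hrev]
      by_cases hbig : 2 * (kN + 1) ≤ rest.length
      · -- full chunk: recurse
        have hmidfull : mid.length = kN + 1 := by omega
        set pre' := pre ++ mid.reverse ++ suf.take (kN + 1) with hpre'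
        set rest' := suf.drop (kN + 1) with hrest'
        have hplen : pre'.length = pre.length + 2 * (kN + 1) := by
          simp [hpre', hmidfull]
          omega
        have hrlen : rest'.length = rest.length - 2 * (kN + 1) := by
          simp [hrest', hsuflen]
          omega
        have hregroup : pre ++ mid.reverse ++ suf = pre' ++ rest' := by
          simp [hpre', hrest', List.append_assoc]
        have hn : ((pre.length : Int) + rest.length) = ((pre'.length : Int) + rest'.length) := by
          rw [hplen, hrlen]; push_cast; omega
        have hrounds : 2 * (r : Int) + 2 = 2 * ((r + 1 : Nat) : Int) := by push_cast; ring
        have hstart2 : 2 * (r : Int) * kk = (pre.length : Int) := hstart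
        have hplenInt : (pre'.length : Int) = 2 * ((r : Int) + 1) * kk := by
          rw [hplen]; push_cast; rw [hpre, hkk]; ring
        have hdd : rest.drop (2 * (kN + 1)) = rest' := by
          rw [hrest', hsuf, List.drop_drop]; congr 1; omega
        rw [hregroup, hn, hrounds, hstart2,
          ihf rest' pre' (r + 1) (pre.length : Int)
            (by rw [hplenInt, hkk]; push_cast; ring)
            (by rw [hrlen]; omega)
            (by intro _; rw [hplen, hrlen]; push_cast; omega)]
        rw [gSpec_cons kN rest hne, hdd, ← hmid, ← hsuf, hpre']
        simp [List.append_assoc]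
      · -- last, partial chunk: the next iteration is past the end
        have hdrop : rest.drop (2 * (kN + 1)) = [] := List.drop_eq_nil_of_le (by omega)
        have hsuftake : suf.take (kN + 1) = suf := List.take_of_length_le (by omega)
        have hdlen : ((pre ++ mid.reverse ++ suf).length : Int)
            = ((pre.length : Int) + rest.length) := by simp; omega
        rw [← hdlen, pvLoop_past kk (by omega) _ (2 * (r : Int) + 2) _
          (by rw [hdlen, hstart] at *; nlinarith [hstart]) (by omega) f]
        rw [gSpec_cons kN rest hne, hdrop, gSpec]
        rw [← hmid, ← hsuf, hsuftake]
        simp [List.append_assoc]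

lemma gSpec_short (kN : Nat) (cs : List Char) (h : cs.length <= 1) : gSpec kN cs = cs := by
  cases cs with
  | nil => rw [gSpec]
  | cons c t =>
    have ht : t = [] := by cases t <;> simp_all
    subst ht
    rw [gSpec_cons kN [c] (List.cons_ne_nil _ _)]
    rw [List.take_of_length_le (by simp), List.drop_eq_nil_of_le (by simp),
      List.drop_eq_nil_of_le (by simp; omega)]
    rw [gSpec]
    simp

lemma pvLoop_stop (d : List Char) (n rounds start kk : Int) (h : ¬ start < n - 1) :
    ∀ fuel, pvLoop d n rounds start kk fuel = d := by
  intro fuel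
  cases fuel with
  | zero => rfl
  | succ f => rw [pvLoop, if_neg h]

-- ===== VERDICT (by name: the statement is the Claim_ definition above) =====
theorem reverseStr_verbose_spec : Claim_equal_reverseStr_verbose := by
  unfold Claim_equal_reverseStr_verbose
  intro s k _ hpre
  unfold Pre_reverseStr_verbose at hpre
  unfold Spec_reverseStr_verbose
  rcases hpre with hpre | ⟨hs, hneg⟩
  case inr =>
    subst hs
    show String.ofList (pvLoop "".toList (("".toList.length : Nat) : Int) 0 0 k ("".toList.length + 2)) = _
    rw [pvLoop_stop _ _ _ _ _ (by simp) _]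
    show _ = String.ofList (PySem.Chars.join [] (List.foldl _ [] (PySem.List.pyRange 0 (("".toList.length : Nat) : Int) (2 * k))))
    simp [PySem.List.pyRange]
  set kN : Nat := (k - 1).toNat with hkN
  have hk : k = (kN : Int) + 1 := by omega
  rw [hk, alt_eq_g s kN]
  unfold reverseStr_verbose
  refine congrArg String.ofList ?_
  have hsl : s.toList.length = s.length := by simp
  by_cases hsmall : s.toList.length <= 1
  · rw [pvLoop_stop _ _ _ _ _ (by omega) _, gSpec_short kN _ hsmall]
  · have := pvLoop_inv kN (s.toList.length + 2) s.toList [] 0 0 (by simp) (by omega)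
      (by intro _; simp; omega)
    simpa using this
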